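-- pv_equiv track=rewrite | github.com/jteijema/asreview-simulation-project | output/plot_generation.py | tds_to_records
-- ===== SOURCE A (Python) =====
-- def tds_to_records(labels):
--     records = []
--     for i in range(labels[-1]):
--         if i+1 in labels:
--             records.append(1)
--         else:
--             records.append(0)
--     return records
-- ===== SOURCE B (Python) =====
-- def tds_to_records(labels):
--     n = labels[-1]
--     records = [0] * n
--     for l in labels:
--         if 1 <= l <= n:
--             records[l - 1] = 1
--     return records
-- ===== Notes on version B (the rewrite author's own statement) =====
-- stated objective: faster
-- what changed: Replaces the per-position membership scan of the labels inside the range loop by allocating a zero list of length equal to the last label once and scattering a one at the position of each in-range label in a single pass over the labels.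
import Mathlib
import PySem

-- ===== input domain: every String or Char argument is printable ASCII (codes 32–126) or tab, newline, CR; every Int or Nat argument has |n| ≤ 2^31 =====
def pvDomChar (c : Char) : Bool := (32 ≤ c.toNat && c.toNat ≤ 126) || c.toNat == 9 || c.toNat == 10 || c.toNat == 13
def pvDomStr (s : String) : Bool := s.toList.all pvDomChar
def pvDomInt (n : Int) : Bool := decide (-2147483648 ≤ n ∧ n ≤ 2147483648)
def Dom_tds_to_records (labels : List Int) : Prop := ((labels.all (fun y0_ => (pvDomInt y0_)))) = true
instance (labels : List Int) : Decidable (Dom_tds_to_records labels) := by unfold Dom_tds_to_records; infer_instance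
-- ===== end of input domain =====

-- B replaces A's per-position membership scan with a one-pass scatter into a preallocated zero list.

-- ===== PORT A =====
-- for i in range(labels[-1]): append 1 if i+1 in labels else 0
def tds_to_records (labels : List Int) : List Int :=
  match PySem.List.pyGet? labels (-1) with
  | none => []          -- unreachable under Pre_ (indexing the last element raises IndexError)
  | some last =>
    (PySem.List.pyRange 0 last 1).foldl
      (fun records i => if (i + 1) ∈ labels then records ++ [1] else records ++ [0]) []

-- ===== PORT B =====
-- n = labels[-1]; records = [0]*n; for l in labels: if 1 <= l <= n: records[l-1] = 1
def tds_to_records_alt (labels : List Int) : List Int :=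
  match PySem.List.pyGet? labels (-1) with
  | none => []          -- unreachable under Pre_ (indexing the last element raises IndexError)
  | some n =>
    labels.foldl
      (fun records l => if 1 ≤ l ∧ l ≤ n then PySem.List.pySetD records (l - 1) 1 else records)
      (PySem.List.pyRepeat [0] n)

-- ===== PRECONDITION & SPEC =====
-- Pre_ excludes only the empty list, on which indexing the last element raises IndexError in both A and B.
def Pre_tds_to_records (labels : List Int) : Prop := labels ≠ []
instance (labels : List Int) : Decidable (Pre_tds_to_records labels) := by unfold Pre_tds_to_records; infer_instance

def pvWitness_tds_to_records : List Int := [2, 1]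

def Spec_tds_to_records (labels : List Int) (out : List Int) : Prop := out = tds_to_records_alt labels
instance (labels : List Int) (out : List Int) : Decidable (Spec_tds_to_records labels out) := by unfold Spec_tds_to_records; infer_instance

-- ===== CLAIM (what is proved, stated in full; the proofs are below) =====
def Claim_equal_tds_to_records : Prop := ∀ (labels : List Int), Dom_tds_to_records labels → Pre_tds_to_records labels → Spec_tds_to_records labels (tds_to_records labels)

-- ===== LEMMAS AND PROOFS =====

theorem scatter_get (n : Int) (ls : List Int) :
    ∀ (recs : List Int) (j : Nat), j < recs.length → (j : Int) + 1 ≤ n →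
      (ls.foldl (fun records l => if 1 ≤ l ∧ l ≤ n then PySem.List.pySetD records (l - 1) 1 else records) recs)[j]? =
        if ((j : Int) + 1) ∈ ls then some 1 else recs[j]? := by
  induction ls with
  | nil => intro recs j hj hn; simp
  | cons l ls ih =>
    intro recs j hj hn
    simp only [List.foldl_cons]
    by_cases h1 : 1 ≤ l ∧ l ≤ n
    · rw [if_pos h1,
          show PySem.List.pySetD recs (l - 1) 1 = recs.set (l - 1).toNat 1 from
            PySem.List.pySetD_of_nonneg _ _ (by omega)]
      rw [ih _ j (by simpa using hj) hn]
      by_cases hmem : ((j : Int) + 1) ∈ ls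
      · simp [hmem]
      · by_cases hlj : l = (j : Int) + 1
        · simp [List.mem_cons, hmem, hlj, hj]
        · have hne : ¬(l.toNat - 1 = j) := by omega
          have hne2 : ¬((j : Int) + 1 = l) := by omega
          simp [List.mem_cons, hmem, hne, hne2]
    · rw [if_neg h1, ih _ j hj hn]
      have hne2 : ¬((j : Int) + 1 = l) := by omega
      by_cases hmem : ((j : Int) + 1) ∈ ls
      · simp [hmem]
      · simp [List.mem_cons, hmem, hne2]

theorem scatter_length (n : Int) (ls : List Int) :
    ∀ (recs : List Int),
      (ls.foldl (fun records l => if 1 ≤ l ∧ l ≤ n then PySem.List.pySetD records (l - 1) 1 else records) recs).length =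
        recs.length := by
  induction ls with
  | nil => intro recs; rfl
  | cons l ls ih =>
    intro recs
    simp only [List.foldl_cons]
    rw [ih]
    split <;> simp [PySem.List.length_pySetD]

theorem tds_to_records_spec : Claim_equal_tds_to_records := by
  intro labels _ hpre
  unfold Spec_tds_to_records tds_to_records tds_to_records_alt
  obtain ⟨n, hn⟩ : ∃ n, PySem.List.pyGet? labels (-1) = some n := by
    cases h : PySem.List.pyGet? labels (-1) with
    | some n => exact ⟨n, rfl⟩
    | none =>
      exfalso
      rw [PySem.List.pyGet?_eq_none_iff] at h
      apply h
      have hlen : 0 < labels.length := List.length_pos_of_ne_nil hpre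
      simp [PySem.Raise.InRange]
      omega
  rw [hn]
  dsimp only
  have hstep : (fun (records : List Int) (i : Int) => if (i + 1) ∈ labels then records ++ [1] else records ++ [0]) =
      fun records i => records ++ [if (i + 1) ∈ labels then 1 else 0] := by
    funext r i; split <;> rfl
  rw [hstep, PySem.List.foldl_append_singleton_eq_map, List.nil_append]
  rw [PySem.List.pyRepeat_singleton]
  apply List.ext_getElem?
  intro j
  have hlenB := scatter_length n labels (List.replicate n.toNat 0)
  by_cases hj : j < n.toNat
  · have hmap : ((PySem.List.pyRange 0 n 1).map (fun i => if (i + 1) ∈ labels then (1:Int) else 0))[j]? =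
        some (if ((j : Int) + 1) ∈ labels then 1 else 0) := by
      rw [List.getElem?_map, PySem.List.getElem?_pyRange_one, if_pos (by omega)]
      simp
    rw [hmap, scatter_get n labels _ j (by simpa using hj) (by omega)]
    split <;> simp [hj]
  · rw [List.getElem?_eq_none (by simp [PySem.List.length_pyRange_one]; omega),
        List.getElem?_eq_none (by rw [hlenB]; simpa using hj)]
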